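-- pv_equiv track=rewrite | github.com/vladc15/SoccerAnalytics | passing_motifs.py | encode_motif
-- ===== SOURCE A (Python) =====
-- def encode_motif(players):
--     """
--     Converts a player sequence into an abstract motif (A, B, C, D).
--     Ex: [Messi, Xavi, Messi, Iniesta] -> ABAC
--     """
--     mapping = {}
--     letters = "ABCDEFGHIJKLMNOPQRSTUVWXYZ"
--     encoded = []
--     for p in players:
--         if p not in mapping:
--             mapping[p] = letters[len(mapping)]
--         encoded.append(mapping[p])
--     return "".join(encoded)
-- ===== SOURCE B (Python) =====
-- def encode_motif(players):
--     """
--     Converts a player sequence into an abstract motif (A, B, C, D).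
--     Ex: [Messi, Xavi, Messi, Iniesta] -> ABAC
--     """
--     letters = "ABCDEFGHIJKLMNOPQRSTUVWXYZ"
--     return "".join(letters[len(set(players[:players.index(p)]))] for p in players)
-- ===== Notes on version B (the rewrite author's own statement) =====
-- stated objective: alternative
-- what changed: B drops A's incrementally-grown letter table entirely: each output letter is computed directly per position as letters[len(set(players[:players.index(p)]))], i.e. the number of distinct players before p's first occurrence, trading A's O(n) dict loop for a table-free quadratic formula.
import Mathlib
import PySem

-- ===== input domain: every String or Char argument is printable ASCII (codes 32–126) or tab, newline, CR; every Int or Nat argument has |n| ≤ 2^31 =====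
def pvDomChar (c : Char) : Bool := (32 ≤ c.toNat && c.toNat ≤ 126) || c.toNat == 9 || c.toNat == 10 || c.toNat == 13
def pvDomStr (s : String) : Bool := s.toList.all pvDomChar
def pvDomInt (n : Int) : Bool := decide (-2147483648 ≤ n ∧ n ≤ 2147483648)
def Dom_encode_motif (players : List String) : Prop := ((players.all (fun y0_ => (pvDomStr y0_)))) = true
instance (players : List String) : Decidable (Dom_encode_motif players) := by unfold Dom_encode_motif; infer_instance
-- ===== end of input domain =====

-- B drops A's incrementally-grown letter table: each letter is computed directly per position
-- as letters[len(set(players[:players.index(p)]))]; objective: alternative (table-free, quadratic).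

def pvLetters : List Char :=
  ['A','B','C','D','E','F','G','H','I','J','K','L','M','N','O','P','Q','R','S','T','U','V','W','X','Y','Z']

-- ===== PORT A =====
-- one loop: grow the mapping on first sight of a player, append its letter each time
def pvStepA (st : PySem.Dict String Char × List Char) (p : String) :
    PySem.Dict String Char × List Char :=
  let mapping :=
    if st.1.contains p = false then
      st.1.insert p ((PySem.List.pyGet? pvLetters (st.1.size : Int)).getD '?')
    else st.1
  (mapping, st.2 ++ [mapping.getD p '?'])

def encode_motif (players : List String) : String :=
  String.ofList (players.foldl pvStepA (PySem.Dict.empty, [])).2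

-- ===== PORT B =====
-- "".join(letters[len(set(players[:players.index(p)]))] for p in players) — no mapping at all
def encode_motif_alt (players : List String) : String :=
  String.ofList (players.map (fun p =>
    (PySem.List.pyGet? pvLetters
      (((PySem.Set.ofList (PySem.List.slice players none
          (some (((PySem.List.index? players p).getD 0 : Nat) : Int)))).length : Nat) : Int)).getD '?'))

-- ===== PRECONDITION & SPEC =====
-- Pre_ excludes inputs with more than 26 distinct players, on which the Python A (and B)
-- raises IndexError indexing the 26-letter alphabet; A returns on exactly the admitted inputs.
def Pre_encode_motif (players : List String) : Prop :=
  (PySem.List.dedup players).length ≤ 26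
instance (players : List String) : Decidable (Pre_encode_motif players) := by
  unfold Pre_encode_motif; infer_instance

def pvWitness_encode_motif : List String := ["Messi", "Xavi", "Messi", "Iniesta"]

def Spec_encode_motif (players : List String) (out : String) : Prop := out = encode_motif_alt players
instance (players : List String) (out : String) : Decidable (Spec_encode_motif players out) := by unfold Spec_encode_motif; infer_instance

-- ===== CLAIM (what is proved, stated in full; the proofs are below) =====
def Claim_equal_encode_motif : Prop := ∀ (players : List String), Dom_encode_motif players → Pre_encode_motif players → Spec_encode_motif players (encode_motif players)

-- ===== LEMMAS AND PROOFS =====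

-- the letter at index k of the alphabet ('?' only past index 25, unreachable under Pre_)
def pvL (k : Nat) : Char := (PySem.List.pyGet? pvLetters (k : Int)).getD '?'

-- the index B computes for p: number of distinct players before p's first occurrence
def pvRank (xs : List String) (p : String) : Nat :=
  (PySem.List.dedup (xs.take ((PySem.List.index? xs p).getD 0))).length

theorem idx_le (xs : List String) (p : String) (k : Nat) (h : PySem.List.index? xs p = some k) :
    k ≤ xs.length := by
  obtain ⟨pre, suf, rfl, hl, -⟩ := (PySem.List.index?_eq_some_iff xs p k).mp h
  simp [← hl]

-- appending more players does not change the rank of a player already seen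
theorem pvRank_stable (pre t : List String) (q : String) (hq : q ∈ pre) :
    pvRank (pre ++ t) q = pvRank pre q := by
  obtain ⟨k, hk⟩ := Option.isSome_iff_exists.mp ((PySem.List.index?_isSome_iff pre q).mpr hq)
  have h2 : PySem.List.index? (pre ++ t) q = some k := by
    rw [PySem.List.index?_append_of_mem t hq, hk]
  unfold pvRank
  rw [hk, h2]
  simp [List.take_append_of_le_length (idx_le pre q k hk)]

-- the rank of a player first seen right after pre is the number of distinct players in pre
theorem pvRank_append_self (pre : List String) (t : List String) (p : String) (hp : p ∉ pre) :
    pvRank (pre ++ p :: t) p = (PySem.List.dedup pre).length := by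
  have h : PySem.List.index? (pre ++ p :: t) p = some pre.length :=
    (PySem.List.index?_eq_some_iff _ p _).mpr ⟨pre, t, rfl, rfl, hp⟩
  unfold pvRank
  rw [h]
  simp [List.take_append_of_le_length (le_refl pre.length)]

theorem dedup_append_mem (pre : List String) (p : String) (hp : p ∈ pre) :
    PySem.List.dedup (pre ++ [p]) = PySem.List.dedup pre := by
  simp [PySem.List.dedup_eq_ofList, PySem.Set.ofList_append_singleton,
    PySem.Set.add_of_mem ((PySem.Set.mem_ofList pre p).mpr hp)]

theorem dedup_append_not_mem (pre : List String) (p : String) (hp : p ∉ pre) :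
    PySem.List.dedup (pre ++ [p]) = PySem.List.dedup pre ++ [p] := by
  have : p ∉ PySem.Set.ofList pre := fun h => hp ((PySem.Set.mem_ofList pre p).mp h)
  simp [PySem.List.dedup_eq_ofList, PySem.Set.ofList_append_singleton,
    PySem.Set.add_of_not_mem this]

-- loop invariant of A: after processing pre, the dict maps each seen player to pvL of its rank,
-- and the emitted letters are exactly B's per-position formula over the full list
theorem stepA_inv (rest : List String) : ∀ (pre : List String) (d : PySem.Dict String Char)
    (out : List Char),
    d.keys = PySem.List.dedup pre →
    d.size = (PySem.List.dedup pre).length →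
    (∀ q ∈ pre, d.getD q '?' = pvL (pvRank pre q)) →
    (rest.foldl pvStepA (d, out)).2 = out ++ rest.map (fun p => pvL (pvRank (pre ++ rest) p)) := by
  induction rest with
  | nil => intro pre d out _ _ _; simp
  | cons p rest ih =>
    intro pre d out hkeys hsize hget
    have hmemkeys : d.contains p = true ↔ p ∈ pre := by
      rw [PySem.Dict.contains_iff_mem_keys, hkeys, PySem.List.mem_dedup]
    by_cases hp : p ∈ pre
    · have hc : d.contains p = true := hmemkeys.mpr hp
      have hstep : pvStepA (d, out) p = (d, out ++ [pvL (pvRank pre p)]) := by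
        simp [pvStepA, hc, hget p hp]
      rw [List.foldl_cons, hstep,
        ih (pre ++ [p]) d (out ++ [pvL (pvRank pre p)])
          (by rw [hkeys, dedup_append_mem pre p hp])
          (by rw [hsize, dedup_append_mem pre p hp])
          (by intro q hq
              have hq' : q ∈ pre := by
                rcases List.mem_append.mp hq with h | h
                · exact h
                · simp only [List.mem_singleton] at h; exact h ▸ hp
              rw [hget q hq', pvRank_stable pre [p] q hq'])]
      have hstab : pvRank (pre ++ p :: rest) p = pvRank pre p := pvRank_stable pre (p :: rest) p hp
      simp [hstab, List.append_assoc]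
    · have hc : d.contains p = false := by
        cases h : d.contains p
        · rfl
        · exact absurd (hmemkeys.mp h) hp
      have hstep : pvStepA (d, out) p
          = (d.insert p (pvL ((PySem.List.dedup pre).length)),
             out ++ [pvL ((PySem.List.dedup pre).length)]) := by
        simp [pvStepA, hc, hsize, pvL, PySem.Dict.getD_insert_self]
      rw [List.foldl_cons, hstep]
      have hkeys' : (d.insert p (pvL ((PySem.List.dedup pre).length))).keys
          = PySem.List.dedup (pre ++ [p]) := by
        rw [PySem.Dict.keys_insert_of_not_contains _ _ hc, hkeys, dedup_append_not_mem pre p hp]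
      have hsize' : (d.insert p (pvL ((PySem.List.dedup pre).length))).size
          = (PySem.List.dedup (pre ++ [p])).length := by
        rw [PySem.Dict.size_insert, hc, dedup_append_not_mem pre p hp]
        simp [hsize]
      have hget' : ∀ q ∈ pre ++ [p],
          (d.insert p (pvL ((PySem.List.dedup pre).length))).getD q '?'
            = pvL (pvRank (pre ++ [p]) q) := by
        intro q hq
        rcases List.mem_append.mp hq with h | h
        · have hne : q ≠ p := fun e => hp (e ▸ h)
          rw [PySem.Dict.getD_insert_of_ne d _ _ hne, hget q h, pvRank_stable pre [p] q h]
        · simp only [List.mem_singleton] at h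
          subst h
          rw [PySem.Dict.getD_insert_self, pvRank_append_self pre [] q hp]
      rw [ih (pre ++ [p]) _ _ hkeys' hsize' hget']
      have hr : pvRank (pre ++ p :: rest) p = (PySem.List.dedup pre).length :=
        pvRank_append_self pre rest p hp
      simp [hr, List.append_assoc]

-- ===== VERDICT (by name: the statement is the Claim_ definition above) =====
theorem encode_motif_spec : Claim_equal_encode_motif := by
  intro players _ _
  unfold Spec_encode_motif encode_motif encode_motif_alt
  rw [stepA_inv players [] PySem.Dict.empty []
    (by simp [PySem.Dict.keys_empty, PySem.List.dedup_eq_ofList, PySem.Set.ofList])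
    (by simp [PySem.Dict.size_empty, PySem.List.dedup_eq_ofList, PySem.Set.ofList])
    (by intro q hq; simp at hq)]
  simp [pvL, pvRank, PySem.List.dedup_eq_ofList, PySem.List.slice_to_natCast]
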